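-- pv_equiv track=rewrite | github.com/QuantumFourier/qft | distributed_qft/distributed_qft_comparison.py | build_node_mapping
-- ===== SOURCE A (Python) =====
-- TOTAL_NODES = 3
--
-- def build_node_mapping(num_qubits: int, num_nodes: int, strategy: str) -> dict[int, int]:
--     if num_nodes < 1 or num_nodes > TOTAL_NODES:
--         raise ValueError(f"num_nodes must be between 1 and {TOTAL_NODES} for the 156-qubit chip layout.")
--     if num_nodes > num_qubits:
--         raise ValueError("num_nodes must not be greater than num_qubits.")
--
--     if strategy == "interleaved":
--         return {qubit: qubit % num_nodes for qubit in range(num_qubits)}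
--
--     base_width = num_qubits // num_nodes
--     extra = num_qubits % num_nodes
--     mapping: dict[int, int] = {}
--     qubit = 0
--
--     for node in range(num_nodes):
--         width = base_width + (1 if node < extra else 0)
--         for _ in range(width):
--             mapping[qubit] = node
--             qubit += 1
--
--     return mapping
-- ===== SOURCE B (Python) =====
-- TOTAL_NODES = 3
--
-- def build_node_mapping(num_qubits: int, num_nodes: int, strategy: str) -> dict[int, int]:
--     if num_nodes < 1 or num_nodes > TOTAL_NODES:
--         raise ValueError(f"num_nodes must be between 1 and {TOTAL_NODES} for the 156-qubit chip layout.")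
--     if num_nodes > num_qubits:
--         raise ValueError("num_nodes must not be greater than num_qubits.")
--
--     if strategy == "interleaved":
--         return {qubit: qubit % num_nodes for qubit in range(num_qubits)}
--
--     base_width = num_qubits // num_nodes
--     extra = num_qubits % num_nodes
--     boundary = extra * (base_width + 1)
--     return {qubit: (qubit // (base_width + 1) if qubit < boundary
--                     else extra + (qubit - boundary) // base_width)
--             for qubit in range(num_qubits)}
-- ===== Notes on version B (the rewrite author's own statement) =====
-- stated objective: simpler
-- what changed: the block strategy's nested node/width accumulation loop with a running qubit counter is replaced by a single dict comprehension computing each qubit's node by a closed-form division formula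
import Mathlib
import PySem

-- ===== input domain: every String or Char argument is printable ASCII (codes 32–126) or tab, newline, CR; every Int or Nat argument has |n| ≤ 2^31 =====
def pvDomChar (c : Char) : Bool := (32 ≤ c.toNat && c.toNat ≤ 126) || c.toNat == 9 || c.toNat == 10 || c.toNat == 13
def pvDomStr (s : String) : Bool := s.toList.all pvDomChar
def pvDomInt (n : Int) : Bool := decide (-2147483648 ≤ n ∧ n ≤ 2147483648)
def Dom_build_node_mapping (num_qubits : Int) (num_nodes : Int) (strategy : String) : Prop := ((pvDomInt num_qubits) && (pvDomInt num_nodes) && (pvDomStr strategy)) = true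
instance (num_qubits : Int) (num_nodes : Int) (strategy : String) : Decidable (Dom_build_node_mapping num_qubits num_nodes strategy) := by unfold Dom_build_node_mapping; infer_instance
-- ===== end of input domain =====

-- B replaces A's nested block-assignment loop by a closed-form per-qubit node formula (simpler, same cost).

-- ===== PORT A =====
-- the body of A's inner 'for _ in range(width)' loop (mapping[qubit] = node; qubit += 1)
def bnmStep (node : Int) (st : PySem.Dict Int Int × Int) : PySem.Dict Int Int × Int :=
  (st.1.insert st.2 node, st.2 + 1)

def build_node_mapping (num_qubits : Int) (num_nodes : Int) (strategy : String) : List (Int × Int) :=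
  if num_nodes < 1 ∨ num_nodes > 3 then []        -- Python raises ValueError here (excluded by Pre_)
  else if num_nodes > num_qubits then []          -- Python raises ValueError here (excluded by Pre_)
  else if strategy = "interleaved" then
    ((PySem.List.pyRange 0 num_qubits 1).foldl
      (fun d qubit => d.insert qubit (PySem.Int.mod qubit num_nodes))
      PySem.Dict.empty).items
  else
    let base_width := PySem.Int.floordiv num_qubits num_nodes
    let extra := PySem.Int.mod num_qubits num_nodes
    let st := (PySem.List.pyRange 0 num_nodes 1).foldl
      (fun (st : PySem.Dict Int Int × Int) node =>
        let width := base_width + (if node < extra then (1:Int) else 0)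
        (PySem.List.pyRange 0 width 1).foldl (fun st2 _ => bnmStep node st2) st)
      (PySem.Dict.empty, 0)
    st.1.items

-- ===== PORT B =====
def build_node_mapping_alt (num_qubits : Int) (num_nodes : Int) (strategy : String) : List (Int × Int) :=
  if num_nodes < 1 ∨ num_nodes > 3 then []        -- Python raises ValueError here (excluded by Pre_)
  else if num_nodes > num_qubits then []          -- Python raises ValueError here (excluded by Pre_)
  else if strategy = "interleaved" then
    ((PySem.List.pyRange 0 num_qubits 1).foldl
      (fun d qubit => d.insert qubit (PySem.Int.mod qubit num_nodes))
      PySem.Dict.empty).items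
  else
    let base_width := PySem.Int.floordiv num_qubits num_nodes
    let extra := PySem.Int.mod num_qubits num_nodes
    let boundary := extra * (base_width + 1)
    ((PySem.List.pyRange 0 num_qubits 1).foldl
      (fun d qubit => d.insert qubit
        (if qubit < boundary then PySem.Int.floordiv qubit (base_width + 1)
         else extra + PySem.Int.floordiv (qubit - boundary) base_width))
      PySem.Dict.empty).items

-- ===== PRECONDITION & SPEC =====
-- Pre_ excludes exactly the inputs on which A raises ValueError (num_nodes outside 1..3, or num_nodes > num_qubits).
def Pre_build_node_mapping (num_qubits : Int) (num_nodes : Int) (strategy : String) : Prop :=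
  1 ≤ num_nodes ∧ num_nodes ≤ 3 ∧ num_nodes ≤ num_qubits

instance (num_qubits : Int) (num_nodes : Int) (strategy : String) : Decidable (Pre_build_node_mapping num_qubits num_nodes strategy) := by unfold Pre_build_node_mapping; infer_instance

def pvWitness_build_node_mapping : Int × Int × String := (7, 3, "block")

def Spec_build_node_mapping (num_qubits : Int) (num_nodes : Int) (strategy : String) (out : List (Int × Int)) : Prop := out = build_node_mapping_alt num_qubits num_nodes strategy
instance (num_qubits : Int) (num_nodes : Int) (strategy : String) (out : List (Int × Int)) : Decidable (Spec_build_node_mapping num_qubits num_nodes strategy out) := by unfold Spec_build_node_mapping; infer_instance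

-- ===== CLAIM (what is proved, stated in full; the proofs are below) =====
def Claim_equal_build_node_mapping : Prop := ∀ (num_qubits : Int) (num_nodes : Int) (strategy : String), Dom_build_node_mapping num_qubits num_nodes strategy → Pre_build_node_mapping num_qubits num_nodes strategy → Spec_build_node_mapping num_qubits num_nodes strategy (build_node_mapping num_qubits num_nodes strategy)

-- ===== LEMMAS AND PROOFS =====

theorem fdiv_seg (x d k : Int) (hd : 0 < d) (h1 : k * d ≤ x) (h2 : x < (k + 1) * d) :
    PySem.Int.floordiv x d = k := by
  rw [PySem.Int.floordiv_eq_iff_of_pos hd]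
  exact ⟨h1, h2⟩

-- a fold that ignores the list elements is an iterate of its step
theorem foldl_ignore {α γ : Type} (g : γ → γ) (l : List α) (init : γ) :
    l.foldl (fun st _ => g st) init = g^[l.length] init := by
  induction l generalizing init with
  | nil => rfl
  | cons a t ih => simp [List.foldl_cons, ih, Function.iterate_succ_apply]

-- A's inner loop writes node at keys q, q+1, …, q+n-1 and advances the counter by n
theorem bnm_inner (node : Int) (n : Nat) :
    ∀ (q : Int) (d : PySem.Dict Int Int),
      (bnmStep node)^[n] (d, q)
        = ((PySem.List.pyRange q (q + n) 1).foldl (fun dd x => dd.insert x node) d, q + n) := by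
  induction n with
  | zero => intro q d; simp [PySem.List.pyRange_one_eq_nil (le_refl q)]
  | succ n ih =>
      intro q d
      have hsplit : PySem.List.pyRange q (q + (n + 1 : Nat)) 1
          = PySem.List.pyRange q (q + n) 1 ++ [q + n] := by
        have : (q + ((n : Int) + 1)) = (q + n) + 1 := by ring
        push_cast
        rw [this, PySem.List.pyRange_one_succ_right (by omega)]
      rw [Function.iterate_succ_apply', ih q d]
      simp only [bnmStep, hsplit, List.foldl_append, List.foldl_cons, List.foldl_nil]
      congr 1
      push_cast
      ring

-- same statement over Python's range(0, w) with an integer width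
theorem bnm_inner' (node w q : Int) (d : PySem.Dict Int Int) (hw : 0 ≤ w) :
    (PySem.List.pyRange 0 w 1).foldl (fun st2 _ => bnmStep node st2) (d, q)
      = ((PySem.List.pyRange q (q + w) 1).foldl (fun dd x => dd.insert x node) d, q + w) := by
  rw [foldl_ignore (bnmStep node)]
  have hl : (PySem.List.pyRange 0 w 1).length = w.toNat := by
    rw [PySem.List.length_pyRange_one]; omega
  rw [hl]
  have := bnm_inner node w.toNat q d
  rw [this]
  have hcast : ((w.toNat : Int)) = w := Int.toNat_of_nonneg hw
  rw [hcast]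

theorem seg_congr (f : Int → Int) (node lo hi : Int) (d : PySem.Dict Int Int)
    (h : ∀ x, lo ≤ x → x < hi → f x = node) :
    (PySem.List.pyRange lo hi 1).foldl (fun dd x => dd.insert x node) d
      = (PySem.List.pyRange lo hi 1).foldl (fun dd x => dd.insert x (f x)) d := by
  apply PySem.List.foldl_congr_mem
  intro acc x hx
  rw [PySem.List.mem_pyRange_one] at hx
  rw [h x hx.1 hx.2]

-- ===== VERDICT (by name: the statement is the Claim_ definition above) =====
theorem build_node_mapping_spec : Claim_equal_build_node_mapping := by
  intro nq nn strategy _hdom hpre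
  obtain ⟨h1, h3, hle⟩ := hpre
  unfold Spec_build_node_mapping build_node_mapping build_node_mapping_alt
  by_cases hs : strategy = "interleaved"
  · simp only [if_neg (show ¬(nn < 1 ∨ nn > 3) by omega), if_neg (show ¬(nn > nq) by omega),
      if_pos hs]
  · simp only [if_neg (show ¬(nn < 1 ∨ nn > 3) by omega), if_neg (show ¬(nn > nq) by omega),
      if_neg hs]
    set bw := PySem.Int.floordiv nq nn with hbwdef
    set e := PySem.Int.mod nq nn with hedef
    have hbe : bw * nn + e = nq := PySem.Int.floordiv_mul_add_mod nq nn
    have he0 : 0 ≤ e := PySem.Int.mod_nonneg nq (by omega)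
    have helt : e < nn := PySem.Int.mod_lt nq (by omega)
    clear_value bw e
    have hbw : 1 ≤ bw := by interval_cases nn <;> omega
    interval_cases nn
    · interval_cases e
      · have hr : PySem.List.pyRange 0 1 1 = [0] := by decide
        simp only [hr, List.foldl_cons, List.foldl_nil]
        rw [show (bw + if (0:Int) < 0 then (1:Int) else 0) = bw by norm_num]
        rw [bnm_inner' 0 bw 0 PySem.Dict.empty (by omega)]
        simp only
        rw [seg_congr (fun x => if x < 0*(bw+1) then PySem.Int.floordiv x (bw+1)
              else 0 + PySem.Int.floordiv (x - 0*(bw+1)) bw) 0 0 (0+bw) PySem.Dict.empty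
            (by intro x hx1 hx2
                beta_reduce
                rw [if_neg (by omega)]
                rw [fdiv_seg (x - 0*(bw+1)) bw 0 (by omega) (by omega) (by omega)]
                norm_num)]
        rw [show (0:Int) + bw = nq by omega]
    · interval_cases e
      · have hr : PySem.List.pyRange 0 2 1 = [0, 1] := by decide
        simp only [hr, List.foldl_cons, List.foldl_nil]
        rw [show (bw + if (0:Int) < 0 then (1:Int) else 0) = bw by norm_num]
        rw [show (bw + if (1:Int) < 0 then (1:Int) else 0) = bw by norm_num]
        rw [bnm_inner' 0 bw (0) _ (by omega)]
        rw [bnm_inner' 1 bw (0 + bw) _ (by omega)]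
        simp only
        rw [seg_congr (fun x => if x < 0 * (bw + 1) then PySem.Int.floordiv x (bw + 1) else 0 + PySem.Int.floordiv (x - 0 * (bw + 1)) bw) 0 (0) (0 + bw) _
            (by intro x hx1 hx2
                beta_reduce
                rw [if_neg (by omega)]
                rw [fdiv_seg (x - 0 * (bw + 1)) bw 0 (by omega) (by omega) (by omega)]
                norm_num)]
        rw [seg_congr (fun x => if x < 0 * (bw + 1) then PySem.Int.floordiv x (bw + 1) else 0 + PySem.Int.floordiv (x - 0 * (bw + 1)) bw) 1 (0 + bw) (0 + bw + bw) _
            (by intro x hx1 hx2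
                beta_reduce
                rw [if_neg (by omega)]
                rw [fdiv_seg (x - 0 * (bw + 1)) bw 1 (by omega) (by omega) (by omega)]
                norm_num)]
        rw [← List.foldl_append]
        rw [← PySem.List.pyRange_one_append (0) (0 + bw) (0 + bw + bw) (by omega) (by omega)]
        rw [show (0:Int) + bw + bw = nq by omega]
      · have hr : PySem.List.pyRange 0 2 1 = [0, 1] := by decide
        simp only [hr, List.foldl_cons, List.foldl_nil]
        rw [show (bw + if (0:Int) < 1 then (1:Int) else 0) = (bw + 1) by norm_num]
        rw [show (bw + if (1:Int) < 1 then (1:Int) else 0) = bw by norm_num]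
        rw [bnm_inner' 0 (bw + 1) (0) _ (by omega)]
        rw [bnm_inner' 1 bw (0 + (bw + 1)) _ (by omega)]
        simp only
        rw [seg_congr (fun x => if x < 1 * (bw + 1) then PySem.Int.floordiv x (bw + 1) else 1 + PySem.Int.floordiv (x - 1 * (bw + 1)) bw) 0 (0) (0 + (bw + 1)) _
            (by intro x hx1 hx2
                beta_reduce
                rw [if_pos (by omega)]
                exact fdiv_seg x (bw + 1) 0 (by omega) (by omega) (by omega))]
        rw [seg_congr (fun x => if x < 1 * (bw + 1) then PySem.Int.floordiv x (bw + 1) else 1 + PySem.Int.floordiv (x - 1 * (bw + 1)) bw) 1 (0 + (bw + 1)) (0 + (bw + 1) + bw) _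
            (by intro x hx1 hx2
                beta_reduce
                rw [if_neg (by omega)]
                rw [fdiv_seg (x - 1 * (bw + 1)) bw 0 (by omega) (by omega) (by omega)]
                norm_num)]
        rw [← List.foldl_append]
        rw [← PySem.List.pyRange_one_append (0) (0 + (bw + 1)) (0 + (bw + 1) + bw) (by omega) (by omega)]
        rw [show (0:Int) + (bw + 1) + bw = nq by omega]
    · interval_cases e
      · have hr : PySem.List.pyRange 0 3 1 = [0, 1, 2] := by decide
        simp only [hr, List.foldl_cons, List.foldl_nil]
        rw [show (bw + if (0:Int) < 0 then (1:Int) else 0) = bw by norm_num]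
        rw [show (bw + if (1:Int) < 0 then (1:Int) else 0) = bw by norm_num]
        rw [show (bw + if (2:Int) < 0 then (1:Int) else 0) = bw by norm_num]
        rw [bnm_inner' 0 bw (0) _ (by omega)]
        rw [bnm_inner' 1 bw (0 + bw) _ (by omega)]
        rw [bnm_inner' 2 bw (0 + bw + bw) _ (by omega)]
        simp only
        rw [seg_congr (fun x => if x < 0 * (bw + 1) then PySem.Int.floordiv x (bw + 1) else 0 + PySem.Int.floordiv (x - 0 * (bw + 1)) bw) 0 (0) (0 + bw) _
            (by intro x hx1 hx2
                beta_reduce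
                rw [if_neg (by omega)]
                rw [fdiv_seg (x - 0 * (bw + 1)) bw 0 (by omega) (by omega) (by omega)]
                norm_num)]
        rw [seg_congr (fun x => if x < 0 * (bw + 1) then PySem.Int.floordiv x (bw + 1) else 0 + PySem.Int.floordiv (x - 0 * (bw + 1)) bw) 1 (0 + bw) (0 + bw + bw) _
            (by intro x hx1 hx2
                beta_reduce
                rw [if_neg (by omega)]
                rw [fdiv_seg (x - 0 * (bw + 1)) bw 1 (by omega) (by omega) (by omega)]
                norm_num)]
        rw [seg_congr (fun x => if x < 0 * (bw + 1) then PySem.Int.floordiv x (bw + 1) else 0 + PySem.Int.floordiv (x - 0 * (bw + 1)) bw) 2 (0 + bw + bw) (0 + bw + bw + bw) _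
            (by intro x hx1 hx2
                beta_reduce
                rw [if_neg (by omega)]
                rw [fdiv_seg (x - 0 * (bw + 1)) bw 2 (by omega) (by omega) (by omega)]
                norm_num)]
        rw [← List.foldl_append]
        rw [← List.foldl_append]
        rw [← PySem.List.pyRange_one_append (0 + bw) (0 + bw + bw) (0 + bw + bw + bw) (by omega) (by omega)]
        rw [← PySem.List.pyRange_one_append (0) (0 + bw) (0 + bw + bw + bw) (by omega) (by omega)]
        rw [show (0:Int) + bw + bw + bw = nq by omega]
      · have hr : PySem.List.pyRange 0 3 1 = [0, 1, 2] := by decide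
        simp only [hr, List.foldl_cons, List.foldl_nil]
        rw [show (bw + if (0:Int) < 1 then (1:Int) else 0) = (bw + 1) by norm_num]
        rw [show (bw + if (1:Int) < 1 then (1:Int) else 0) = bw by norm_num]
        rw [show (bw + if (2:Int) < 1 then (1:Int) else 0) = bw by norm_num]
        rw [bnm_inner' 0 (bw + 1) (0) _ (by omega)]
        rw [bnm_inner' 1 bw (0 + (bw + 1)) _ (by omega)]
        rw [bnm_inner' 2 bw (0 + (bw + 1) + bw) _ (by omega)]
        simp only
        rw [seg_congr (fun x => if x < 1 * (bw + 1) then PySem.Int.floordiv x (bw + 1) else 1 + PySem.Int.floordiv (x - 1 * (bw + 1)) bw) 0 (0) (0 + (bw + 1)) _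
            (by intro x hx1 hx2
                beta_reduce
                rw [if_pos (by omega)]
                exact fdiv_seg x (bw + 1) 0 (by omega) (by omega) (by omega))]
        rw [seg_congr (fun x => if x < 1 * (bw + 1) then PySem.Int.floordiv x (bw + 1) else 1 + PySem.Int.floordiv (x - 1 * (bw + 1)) bw) 1 (0 + (bw + 1)) (0 + (bw + 1) + bw) _
            (by intro x hx1 hx2
                beta_reduce
                rw [if_neg (by omega)]
                rw [fdiv_seg (x - 1 * (bw + 1)) bw 0 (by omega) (by omega) (by omega)]
                norm_num)]
        rw [seg_congr (fun x => if x < 1 * (bw + 1) then PySem.Int.floordiv x (bw + 1) else 1 + PySem.Int.floordiv (x - 1 * (bw + 1)) bw) 2 (0 + (bw + 1) + bw) (0 + (bw + 1) + bw + bw) _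
            (by intro x hx1 hx2
                beta_reduce
                rw [if_neg (by omega)]
                rw [fdiv_seg (x - 1 * (bw + 1)) bw 1 (by omega) (by omega) (by omega)]
                norm_num)]
        rw [← List.foldl_append]
        rw [← List.foldl_append]
        rw [← PySem.List.pyRange_one_append (0 + (bw + 1)) (0 + (bw + 1) + bw) (0 + (bw + 1) + bw + bw) (by omega) (by omega)]
        rw [← PySem.List.pyRange_one_append (0) (0 + (bw + 1)) (0 + (bw + 1) + bw + bw) (by omega) (by omega)]
        rw [show (0:Int) + (bw + 1) + bw + bw = nq by omega]
      · have hr : PySem.List.pyRange 0 3 1 = [0, 1, 2] := by decide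
        simp only [hr, List.foldl_cons, List.foldl_nil]
        rw [show (bw + if (0:Int) < 2 then (1:Int) else 0) = (bw + 1) by norm_num]
        rw [show (bw + if (1:Int) < 2 then (1:Int) else 0) = (bw + 1) by norm_num]
        rw [show (bw + if (2:Int) < 2 then (1:Int) else 0) = bw by norm_num]
        rw [bnm_inner' 0 (bw + 1) (0) _ (by omega)]
        rw [bnm_inner' 1 (bw + 1) (0 + (bw + 1)) _ (by omega)]
        rw [bnm_inner' 2 bw (0 + (bw + 1) + (bw + 1)) _ (by omega)]
        simp only
        rw [seg_congr (fun x => if x < 2 * (bw + 1) then PySem.Int.floordiv x (bw + 1) else 2 + PySem.Int.floordiv (x - 2 * (bw + 1)) bw) 0 (0) (0 + (bw + 1)) _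
            (by intro x hx1 hx2
                beta_reduce
                rw [if_pos (by omega)]
                exact fdiv_seg x (bw + 1) 0 (by omega) (by omega) (by omega))]
        rw [seg_congr (fun x => if x < 2 * (bw + 1) then PySem.Int.floordiv x (bw + 1) else 2 + PySem.Int.floordiv (x - 2 * (bw + 1)) bw) 1 (0 + (bw + 1)) (0 + (bw + 1) + (bw + 1)) _
            (by intro x hx1 hx2
                beta_reduce
                rw [if_pos (by omega)]
                exact fdiv_seg x (bw + 1) 1 (by omega) (by omega) (by omega))]
        rw [seg_congr (fun x => if x < 2 * (bw + 1) then PySem.Int.floordiv x (bw + 1) else 2 + PySem.Int.floordiv (x - 2 * (bw + 1)) bw) 2 (0 + (bw + 1) + (bw + 1)) (0 + (bw + 1) + (bw + 1) + bw) _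
            (by intro x hx1 hx2
                beta_reduce
                rw [if_neg (by omega)]
                rw [fdiv_seg (x - 2 * (bw + 1)) bw 0 (by omega) (by omega) (by omega)]
                norm_num)]
        rw [← List.foldl_append]
        rw [← List.foldl_append]
        rw [← PySem.List.pyRange_one_append (0 + (bw + 1)) (0 + (bw + 1) + (bw + 1)) (0 + (bw + 1) + (bw + 1) + bw) (by omega) (by omega)]
        rw [← PySem.List.pyRange_one_append (0) (0 + (bw + 1)) (0 + (bw + 1) + (bw + 1) + bw) (by omega) (by omega)]
        rw [show (0:Int) + (bw + 1) + (bw + 1) + bw = nq by omega]
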